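-- pv_equiv track=rewrite | github.com/Benedikt92/MasterThesisRepo | SMCOScripts/list_workflow_configurations.py | placement_configurations_for_list_of_functions
-- ===== SOURCE A (Python) =====
-- def placement_configurations_for_list_of_functions(list_of_functions):
-- 	if len(list_of_functions) == 1:
-- 		function = list_of_functions[0]
-- 		cloud_function = function + ' @ C'
-- 		edge_function = function + ' @ E'
-- 		return [[cloud_function], [edge_function]]
--
-- 	function = list_of_functions[0]
-- 	cloud_function = function + ' @ C'
-- 	edge_function = function + ' @ E'
--
-- 	lis = []
-- 	res = placement_configurations_for_list_of_functions(list_of_functions[1:])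
-- 	for elem in res:
-- 		lis.append([cloud_function] + elem)
-- 		lis.append([edge_function] + elem)
--
-- 	return lis
-- ===== SOURCE B (Python) =====
-- def placement_configurations_for_list_of_functions(list_of_functions):
--     n = len(list_of_functions)
--     configs = []
--     for k in range(2 ** n):
--         configs.append([f + (' @ E' if (k >> i) & 1 else ' @ C')
--                         for i, f in enumerate(list_of_functions)])
--     return configs
-- ===== Notes on version B (the rewrite author's own statement) =====
-- stated objective: alternative
-- what changed: Replaces A's tail recursion with self-calls on slices by a single iterative bitmask enumeration: for each k in range(2**n) function i is placed at the edge iff bit i of k is set (bit 0 = first function, reproducing A's first-function-varies-fastest order); Pre_ excludes only the empty list, on which A raises IndexError.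
import Mathlib
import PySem

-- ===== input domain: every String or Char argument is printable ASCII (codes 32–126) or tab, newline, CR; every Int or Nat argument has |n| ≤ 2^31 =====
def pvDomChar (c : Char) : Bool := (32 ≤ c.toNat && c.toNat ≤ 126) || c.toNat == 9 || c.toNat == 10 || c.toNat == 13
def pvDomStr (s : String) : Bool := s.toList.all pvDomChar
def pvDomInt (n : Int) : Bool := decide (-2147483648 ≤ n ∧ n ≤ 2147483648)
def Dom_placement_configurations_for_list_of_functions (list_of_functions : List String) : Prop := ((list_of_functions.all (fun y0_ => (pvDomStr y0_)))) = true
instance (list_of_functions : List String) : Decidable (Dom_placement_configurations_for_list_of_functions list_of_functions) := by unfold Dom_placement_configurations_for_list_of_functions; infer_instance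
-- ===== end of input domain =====

-- B replaces A's recursion on the tail by one iterative bitmask sweep over range(2^n);
-- objective: alternative (same cost, genuinely different decomposition).

-- ===== PORT A =====
-- A: recursion; base case len == 1; otherwise two appends per element of the recursive
-- result on the tail (list_of_functions[1:]). On [] Python raises IndexError (excluded by Pre_).
def placement_configurations_for_list_of_functions (list_of_functions : List String) : List (List String) :=
  match list_of_functions with
  | [] => []            -- Python raises IndexError here; outside Pre_
  | [function] =>
      let cloud_function := function ++ " @ C"
      let edge_function := function ++ " @ E"
      [[cloud_function], [edge_function]]
  | function :: rest =>
      let cloud_function := function ++ " @ C"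
      let edge_function := function ++ " @ E"
      let res := placement_configurations_for_list_of_functions rest
      res.foldl (fun lis elem => (lis ++ [[cloud_function] ++ elem]) ++ [[edge_function] ++ elem]) []

-- ===== PORT B =====
-- B: for each k in range(2 ** n) build the config by the bits of k (bit i of k set = edge).
def placement_configurations_for_list_of_functions_alt (list_of_functions : List String) : List (List String) :=
  (List.range (2 ^ list_of_functions.length)).map (fun k =>
    (PySem.List.enumerate list_of_functions).map (fun p =>
      p.2 ++ (if (k >>> p.1.toNat) &&& 1 == 1 then " @ E" else " @ C")))

-- ===== PRECONDITION & SPEC =====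
-- Pre_ excludes only the empty list, on which A raises IndexError.
def Pre_placement_configurations_for_list_of_functions (list_of_functions : List String) : Prop := list_of_functions.length ≠ 0
instance (list_of_functions : List String) : Decidable (Pre_placement_configurations_for_list_of_functions list_of_functions) := by unfold Pre_placement_configurations_for_list_of_functions; infer_instance
def pvWitness_placement_configurations_for_list_of_functions : List String := ["f1", "f2"]

def Spec_placement_configurations_for_list_of_functions (list_of_functions : List String) (out : List (List String)) : Prop := out = placement_configurations_for_list_of_functions_alt list_of_functions
instance (list_of_functions : List String) (out : List (List String)) : Decidable (Spec_placement_configurations_for_list_of_functions list_of_functions out) := by unfold Spec_placement_configurations_for_list_of_functions; infer_instance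

-- ===== CLAIM (what is proved, stated in full; the proofs are below) =====
def Claim_equal_placement_configurations_for_list_of_functions : Prop := ∀ (list_of_functions : List String), Dom_placement_configurations_for_list_of_functions list_of_functions → Pre_placement_configurations_for_list_of_functions list_of_functions → Spec_placement_configurations_for_list_of_functions list_of_functions (placement_configurations_for_list_of_functions list_of_functions)

-- ===== LEMMAS AND PROOFS =====

-- A's per-element double append, as a flatMap.
theorem foldl_two_appends {α β : Type} (u v : α → β) :
    ∀ (l : List α) (acc : List β),
      l.foldl (fun lis elem => (lis ++ [u elem]) ++ [v elem]) acc
        = acc ++ l.flatMap (fun elem => [u elem, v elem]) := by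
  intro l
  induction l with
  | nil => intro acc; simp
  | cons x xs ih => intro acc; simp [List.foldl, List.flatMap_def]

-- range(2*M) splits into pairs (2j, 2j+1).
theorem pv_range_two_mul (M : Nat) :
    List.range (2 * M) = (List.range M).flatMap (fun j => [2 * j, 2 * j + 1]) := by
  induction M with
  | zero => simp
  | succ m ih =>
      have h : 2 * (m + 1) = (2 * m) + 1 + 1 := by omega
      rw [h, List.range_succ, List.range_succ, List.range_succ, ih]
      simp

-- Shifting the enumeration start by one is the same as halving the mask.
theorem enumerate_shift (k : Nat) :
    ∀ (r : List String) (s : Nat),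
      (PySem.List.enumerate r ((s : Int) + 1)).map (fun p =>
          p.2 ++ (if (k >>> p.1.toNat) &&& 1 == 1 then " @ E" else " @ C"))
        = (PySem.List.enumerate r (s : Int)).map (fun p =>
          p.2 ++ (if ((k >>> 1) >>> p.1.toNat) &&& 1 == 1 then " @ E" else " @ C")) := by
  intro r
  induction r with
  | nil => intro s; simp [PySem.List.enumerate_nil]
  | cons x xs ih =>
      intro s
      have hs : ((s : Int) + 1) = ((s + 1 : Nat) : Int) := by push_cast; ring
      rw [PySem.List.enumerate_cons, PySem.List.enumerate_cons]
      simp only [List.map_cons]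
      congr 1
      · have ht : (s : Int).toNat = s := by omega
        have ht1 : ((s : Int) + 1).toNat = s + 1 := by omega
        rw [ht, ht1]
        have : k >>> (s + 1) = (k >>> 1) >>> s := by
          rw [Nat.add_comm, Nat.shiftRight_add]
        rw [this]
      · rw [hs]
        have := ih (s + 1)
        push_cast at this ⊢
        rw [show ((s : Int) + 1 + 1) = ((s + 1 : Nat) : Int) + 1 by push_cast; ring]
        exact this

-- One config of B on a cons, by the low bit and the shifted mask.
theorem config_cons (f : String) (r : List String) (k : Nat) :
    (PySem.List.enumerate (f :: r)).map (fun p =>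
        p.2 ++ (if (k >>> p.1.toNat) &&& 1 == 1 then " @ E" else " @ C"))
      = (f ++ (if k &&& 1 == 1 then " @ E" else " @ C"))
        :: (PySem.List.enumerate r).map (fun p =>
            p.2 ++ (if ((k >>> 1) >>> p.1.toNat) &&& 1 == 1 then " @ E" else " @ C")) := by
  rw [PySem.List.enumerate_cons]
  simp only [List.map_cons]
  congr 1
  simpa using enumerate_shift k r 0

-- B satisfies A's recurrence.
theorem alt_cons (f : String) (r : List String) :
    placement_configurations_for_list_of_functions_alt (f :: r)
      = (placement_configurations_for_list_of_functions_alt r).flatMap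
          (fun elem => [(f ++ " @ C") :: elem, (f ++ " @ E") :: elem]) := by
  unfold placement_configurations_for_list_of_functions_alt
  have hlen : 2 ^ (f :: r).length = 2 * 2 ^ r.length := by
    simp [List.length_cons, pow_succ]; ring
  rw [hlen, pv_range_two_mul, List.map_flatMap, List.flatMap_map]
  congr 1
  funext j
  simp only [List.map_cons, List.map_nil]
  rw [config_cons, config_cons]
  have h0 : (2 * j) &&& 1 = 0 := by rw [Nat.and_one_is_mod]; omega
  have h1 : (2 * j + 1) &&& 1 = 1 := by rw [Nat.and_one_is_mod]; omega
  have hs0 : (2 * j) >>> 1 = j := by rw [Nat.shiftRight_one]; omega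
  have hs1 : (2 * j + 1) >>> 1 = j := by rw [Nat.shiftRight_one]; omega
  rw [h0, h1, hs0, hs1]
  simp

theorem alt_single (f : String) :
    placement_configurations_for_list_of_functions_alt [f]
      = [[f ++ " @ C"], [f ++ " @ E"]] := by
  unfold placement_configurations_for_list_of_functions_alt
  simp [List.range_succ, PySem.List.enumerate_cons, PySem.List.enumerate_nil]

theorem main_eq : ∀ (xs : List String), xs ≠ [] →
    placement_configurations_for_list_of_functions xs
      = placement_configurations_for_list_of_functions_alt xs := by
  intro xs
  induction xs with
  | nil => intro h; exact absurd rfl h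
  | cons f r ih =>
      intro _
      cases r with
      | nil =>
          rw [alt_single]
          rfl
      | cons g rs =>
          rw [alt_cons]
          show (placement_configurations_for_list_of_functions (g :: rs)).foldl _ [] = _
          rw [foldl_two_appends, ih (by simp)]
          simp

-- ===== VERDICT (by name: the statement is the Claim_ definition above) =====
theorem placement_configurations_for_list_of_functions_spec : Claim_equal_placement_configurations_for_list_of_functions := by
  intro xs _ hpre
  exact main_eq xs (fun h => hpre (by simp [h]))
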